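-- pv_equiv track=rewrite | github.com/SnehaGupta1/SupplyChainGuard | core/typosquat_detector.py | _repeated_char_check
-- ===== SOURCE A (Python) =====
-- def _repeated_char_check(suspect, legitimate):
--     """Detect added/removed characters: requsets vs requests"""
--     if abs(len(suspect) - len(legitimate)) != 1:
--         return False
--
--     longer = suspect if len(suspect) > len(legitimate) else legitimate
--     shorter = suspect if len(suspect) < len(legitimate) else legitimate
--
--     diffs = 0
--     j = 0
--     for i in range(len(longer)):
--         if j < len(shorter) and longer[i].lower() == shorter[j].lower():
--             j += 1
--         else:
--             diffs += 1
--
--     return diffs <= 1 and suspect.lower() != legitimate.lower()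
-- ===== SOURCE B (Python) =====
-- def _repeated_char_check(suspect, legitimate):
--     """Detect added/removed characters: requsets vs requests"""
--     if abs(len(suspect) - len(legitimate)) != 1:
--         return False
--
--     if len(suspect) > len(legitimate):
--         longer, shorter = suspect.lower(), legitimate.lower()
--     else:
--         longer, shorter = legitimate.lower(), suspect.lower()
--
--     i = 0
--     while i < len(shorter) and longer[i] == shorter[i]:
--         i += 1
--     return longer[i + 1:] == shorter[i:]
-- ===== Notes on version B (the rewrite author's own statement) =====
-- stated objective: simpler
-- what changed: Replaces A's greedy diff-counting two-pointer sweep (count unmatched characters, then test diffs <= 1 plus a redundant case-insensitive inequality) with a find-first-divergence scan that compares the remaining suffixes once, dropping the always-true final inequality check.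
import Mathlib
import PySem

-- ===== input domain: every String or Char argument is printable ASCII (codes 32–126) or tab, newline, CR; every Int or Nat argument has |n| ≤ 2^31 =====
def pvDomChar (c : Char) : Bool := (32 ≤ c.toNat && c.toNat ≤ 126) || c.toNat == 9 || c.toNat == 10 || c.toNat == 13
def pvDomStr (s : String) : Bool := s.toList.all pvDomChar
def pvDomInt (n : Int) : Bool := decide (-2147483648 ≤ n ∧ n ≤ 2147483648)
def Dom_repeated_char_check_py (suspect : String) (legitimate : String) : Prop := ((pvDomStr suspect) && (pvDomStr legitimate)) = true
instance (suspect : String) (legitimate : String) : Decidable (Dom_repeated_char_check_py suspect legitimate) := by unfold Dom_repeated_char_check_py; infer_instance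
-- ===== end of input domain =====

-- B replaces A's greedy diff-counting two-pointer sweep by a find-first-divergence-then-
-- compare-suffixes scan and drops A's redundant final inequality check (objective: simpler).

-- ===== PORT A =====
-- one iteration of A's for-loop: state (diffs, j), c = longer[i]; shorter[j] guarded by j < len(shorter)
def pvAStep (shorter : List Char) (st : Nat × Nat) (c : Char) : Nat × Nat :=
  match shorter[st.2]? with
  | some d =>
      if PySem.Chars.lowerChar c = PySem.Chars.lowerChar d then (st.1, st.2 + 1)
      else (st.1 + 1, st.2)
  | none => (st.1 + 1, st.2)

def repeated_char_check_py (suspect : String) (legitimate : String) : Bool :=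
  let ss := suspect.toList
  let ls := legitimate.toList
  if ((ss.length : Int) - (ls.length : Int)).natAbs ≠ 1 then false
  else
    let longer := if ss.length > ls.length then ss else ls
    let shorter := if ss.length < ls.length then ss else ls
    let st := longer.foldl (pvAStep shorter) (0, 0)
    decide (st.1 ≤ 1) && decide (PySem.Chars.lower ss ≠ PySem.Chars.lower ls)

-- ===== PORT B =====
-- B's while-loop: advance past the common (lowered) prefix, then compare longer[i+1:] with shorter[i:]
def pvBScan (longer shorter : List Char) : Bool :=
  match longer, shorter with
  | l, [] => l.drop 1 == ([] : List Char)
  | [], _ :: _ => false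
  | c :: l', d :: s' => if c = d then pvBScan l' s' else l' == d :: s'

def repeated_char_check_py_alt (suspect : String) (legitimate : String) : Bool :=
  let ss := suspect.toList
  let ls := legitimate.toList
  if ((ss.length : Int) - (ls.length : Int)).natAbs ≠ 1 then false
  else if ss.length > ls.length then
    pvBScan (PySem.Chars.lower ss) (PySem.Chars.lower ls)
  else
    pvBScan (PySem.Chars.lower ls) (PySem.Chars.lower ss)

-- ===== PRECONDITION & SPEC =====
def Spec_repeated_char_check_py (suspect : String) (legitimate : String) (out : Bool) : Prop := out = repeated_char_check_py_alt suspect legitimate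
instance (suspect : String) (legitimate : String) (out : Bool) : Decidable (Spec_repeated_char_check_py suspect legitimate out) := by unfold Spec_repeated_char_check_py; infer_instance

-- ===== CLAIM (what is proved, stated in full; the proofs are below) =====
def Claim_equal_repeated_char_check_py : Prop := ∀ (suspect : String) (legitimate : String), Dom_repeated_char_check_py suspect legitimate → Spec_repeated_char_check_py suspect legitimate (repeated_char_check_py suspect legitimate)

-- ===== LEMMAS AND PROOFS =====

-- unmatched-count of A's greedy sweep on plain (already lowered) lists
def pvG (L S : List Char) : Nat :=
  match L, S with
  | [], _ => 0
  | _ :: L', [] => pvG L' [] + 1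
  | c :: L', d :: S' => if c = d then pvG L' S' else pvG L' (d :: S') + 1

theorem pvFold_eq (L : List Char) : ∀ (S : List Char) (d j : Nat), j ≤ S.length →
    (L.foldl (pvAStep S) (d, j)).1
      = d + pvG (L.map PySem.Chars.lowerChar) ((S.drop j).map PySem.Chars.lowerChar) := by
  induction L with
  | nil => intro S d j _; simp [pvG]
  | cons c L' ih =>
    intro S d j hj
    rw [List.foldl_cons]
    rcases Nat.lt_or_ge j S.length with hlt | hge
    · have hdrop : S.drop j = S[j] :: S.drop (j + 1) := (List.getElem_cons_drop hlt).symm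
      have hstep : pvAStep S (d, j) c =
          if PySem.Chars.lowerChar c = PySem.Chars.lowerChar S[j] then (d, j + 1)
          else (d + 1, j) := by
        simp [pvAStep, List.getElem?_eq_getElem hlt]
      by_cases hc : PySem.Chars.lowerChar c = PySem.Chars.lowerChar S[j]
      · rw [hstep, if_pos hc, ih S d (j + 1) hlt, hdrop, List.map_cons, List.map_cons]
        simp [pvG, hc]
      · rw [hstep, if_neg hc, ih S (d + 1) j hj, hdrop, List.map_cons, List.map_cons]
        simp only [pvG, if_neg hc]
        omega
    · have hj' : j = S.length := le_antisymm hj hge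
      have hnone : S[j]? = none := by simp [hj']
      have hstep : pvAStep S (d, j) c = (d + 1, j) := by simp [pvAStep, hnone]
      rw [hstep, ih S (d + 1) j hj, List.drop_of_length_le hge]
      simp only [List.map_cons, List.map_nil, pvG]
      omega

theorem pvG_zero_iff (A : List Char) : ∀ B : List Char, A.length = B.length →
    (pvG A B = 0 ↔ A = B) := by
  induction A with
  | nil => intro B h; cases B <;> simp_all [pvG]
  | cons a A' ih =>
    intro B h
    cases B with
    | nil => simp at h
    | cons b B' =>
      by_cases hab : a = b
      · subst hab
        have hiff := ih B' (by simpa using h)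
        simp [pvG, hiff]
      · simp [pvG, hab]

theorem pvG_le_one_iff (S : List Char) : ∀ L : List Char, L.length = S.length + 1 →
    (pvG L S ≤ 1 ↔ pvBScan L S = true) := by
  induction S with
  | nil =>
    intro L h
    match L, h with
    | [c], _ => simp [pvG, pvBScan]
  | cons d S' ih =>
    intro L h
    match L with
    | [] => simp at h
    | c :: L' =>
      by_cases hcd : c = d
      · subst hcd
        rw [show pvG (c :: L') (c :: S') = pvG L' S' from by simp [pvG]]
        rw [show pvBScan (c :: L') (c :: S') = pvBScan L' S' from by simp [pvBScan]]
        exact ih L' (by simpa using h)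
      · rw [show pvG (c :: L') (d :: S') = pvG L' (d :: S') + 1 from by simp [pvG, hcd]]
        rw [show pvBScan (c :: L') (d :: S') = (L' == d :: S') from by simp [pvBScan, hcd]]
        have hz := pvG_zero_iff L' (d :: S') (by simpa using h)
        constructor
        · intro hle
          have : pvG L' (d :: S') = 0 := by omega
          simp [hz.mp this]
        · intro hb
          have := hz.mpr (by simpa using hb)
          omega

theorem pvEnd_eq (M N M' N' : List Char) (hne : M' ≠ N')
    (hiff : pvG M N ≤ 1 ↔ pvBScan M N = true) :
    (decide (pvG M N ≤ 1) && decide (M' ≠ N')) = pvBScan M N := by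
  by_cases hle : pvG M N ≤ 1
  · simp [hle, hne, hiff.mp hle]
  · have hb : pvBScan M N = false := by
      cases hb : pvBScan M N
      · rfl
      · exact absurd (hiff.mpr hb) hle
    simp [hle, hb]

-- ===== VERDICT (by name: the statement is the Claim_ definition above) =====
theorem repeated_char_check_py_spec : Claim_equal_repeated_char_check_py := by
  intro suspect legitimate _
  unfold Spec_repeated_char_check_py repeated_char_check_py repeated_char_check_py_alt
  set ss := suspect.toList with hss
  set ls := legitimate.toList with hls
  by_cases hlen : ((ss.length : Int) - (ls.length : Int)).natAbs ≠ 1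
  · simp [hlen]
  · simp only [if_neg hlen]
    by_cases hgt : ss.length > ls.length
    · have hlt : ¬ ss.length < ls.length := by omega
      have hlen1 : ss.length = ls.length + 1 := by omega
      simp only [if_pos hgt, if_neg hlt, PySem.Chars.lower]
      rw [pvFold_eq ss ls 0 0 (Nat.zero_le _), List.drop_zero, Nat.zero_add]
      have hne : ss.map PySem.Chars.lowerChar ≠ ls.map PySem.Chars.lowerChar := by
        intro he
        have := congrArg List.length he
        simp [hlen1] at this
      exact pvEnd_eq _ _ _ _ hne
        (pvG_le_one_iff (ls.map PySem.Chars.lowerChar) (ss.map PySem.Chars.lowerChar)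
          (by simp [hlen1]))
    · have hlt : ss.length < ls.length := by omega
      have hlen1 : ls.length = ss.length + 1 := by omega
      simp only [if_neg hgt, if_pos hlt, PySem.Chars.lower]
      rw [pvFold_eq ls ss 0 0 (Nat.zero_le _), List.drop_zero, Nat.zero_add]
      have hne : ss.map PySem.Chars.lowerChar ≠ ls.map PySem.Chars.lowerChar := by
        intro he
        have := congrArg List.length he
        simp [hlen1] at this
      exact pvEnd_eq _ _ _ _ hne
        (pvG_le_one_iff (ss.map PySem.Chars.lowerChar) (ls.map PySem.Chars.lowerChar)
          (by simp [hlen1]))
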